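-- pv_equiv track=rewrite | github.com/rajivpant/ragbot | src/ragbot_streamlit.py | find_closest_max_tokens
-- ===== SOURCE A (Python) =====
-- def find_closest_max_tokens(suggested_max_tokens, max_tokens_mapping):
--     """Finds the closest max_tokens option that is less than or equal to the suggested value,
--        or returns the lowest available option if the suggested value is too low."""
--
--     closest_option = None
--     closest_difference = float('inf')
--
--     for option, value in max_tokens_mapping.items():
--         difference = suggested_max_tokens - value
--         if 0 <= difference < closest_difference:
--             closest_option = option
--             closest_difference = difference
--
--     # If no suitable option found, return the lowest available option
--     if closest_option is None:
--         return min(max_tokens_mapping, key=max_tokens_mapping.get)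
--
--     return closest_option
-- ===== SOURCE B (Python) =====
-- def find_closest_max_tokens(suggested_max_tokens, max_tokens_mapping):
--     """Finds the closest max_tokens option that is less than or equal to the suggested value,
--        or returns the lowest available option if the suggested value is too low."""
--     values = list(max_tokens_mapping.values())
--     qualifying = [v for v in values if v <= suggested_max_tokens]
--     target = max(qualifying) if qualifying else min(values)
--     for option, value in max_tokens_mapping.items():
--         if value == target:
--             return option
-- ===== Notes on version B (the rewrite author's own statement) =====
-- stated objective: alternative
-- what changed: Instead of A's running-argmin-over-keyed-differences loop with an infinity sentinel, B works at the value level: it computes the target VALUE first (max of the qualifying values, else min of all values) and then scans the mapping once for the first key carrying that value.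
-- outside the precondition, e.g. on find_closest_max_tokens(5, {}): A raises ValueError, B raises ValueError
import Mathlib
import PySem

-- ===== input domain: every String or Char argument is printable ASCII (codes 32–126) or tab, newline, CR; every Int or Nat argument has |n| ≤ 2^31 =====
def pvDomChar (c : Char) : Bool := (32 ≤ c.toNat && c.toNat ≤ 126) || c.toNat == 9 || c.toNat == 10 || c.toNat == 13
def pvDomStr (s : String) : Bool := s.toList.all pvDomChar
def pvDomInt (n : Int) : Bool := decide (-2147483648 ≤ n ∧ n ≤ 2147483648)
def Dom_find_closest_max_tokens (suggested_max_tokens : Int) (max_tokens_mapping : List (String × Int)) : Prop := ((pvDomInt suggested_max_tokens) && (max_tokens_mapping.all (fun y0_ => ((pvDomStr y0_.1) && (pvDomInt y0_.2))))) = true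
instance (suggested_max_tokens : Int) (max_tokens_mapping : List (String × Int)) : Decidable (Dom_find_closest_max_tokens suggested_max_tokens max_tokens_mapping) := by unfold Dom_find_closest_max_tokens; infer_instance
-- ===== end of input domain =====

-- B replaces A's running-argmin loop over keyed differences by a value-level computation:
-- first determine the target value (max of qualifying values, else min of all values),
-- then scan once for the first key carrying that value (objective: alternative decomposition).


-- ===== PORT A =====
-- the loop body of A: state = (closest_option, closest_difference), none = float('inf')
def pvAStep (s : Int) (st : Option String × Option Int) (p : String × Int) : Option String × Option Int :=
  let d := s - p.2
  match st.2 with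
  | none => if 0 ≤ d then (some p.1, some d) else st
  | some cd => if 0 ≤ d ∧ d < cd then (some p.1, some d) else st

-- min(max_tokens_mapping, key=max_tokens_mapping.get): first key with minimal value
def pvAMinStep (acc : Option (String × Int)) (p : String × Int) : Option (String × Int) :=
  match acc with
  | none => some p
  | some q => if p.2 < q.2 then some p else acc

def pvAMinBySnd (l : List (String × Int)) : Option (String × Int) :=
  l.foldl pvAMinStep none

def find_closest_max_tokens (suggested_max_tokens : Int) (max_tokens_mapping : List (String × Int)) : String :=
  let r := max_tokens_mapping.foldl (pvAStep suggested_max_tokens) ((none : Option String), (none : Option Int))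
  match r.1 with
  | none => (match pvAMinBySnd max_tokens_mapping with | some p => p.1 | none => "")  -- min of empty raises; excluded by Pre_
  | some k => k

-- ===== PORT B =====
-- max(l) over a Python list of ints (none = empty list, where max raises)
def pvMaxInt? (l : List Int) : Option Int :=
  l.foldl (fun acc v => match acc with | none => some v | some w => if w < v then some v else acc) none

-- min(l) over a Python list of ints
def pvMinInt? (l : List Int) : Option Int :=
  l.foldl (fun acc v => match acc with | none => some v | some w => if v < w then some v else acc) none

def find_closest_max_tokens_alt (suggested_max_tokens : Int) (max_tokens_mapping : List (String × Int)) : String :=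
  let values := max_tokens_mapping.map Prod.snd
  let qualifying := values.filter (fun v => v ≤ suggested_max_tokens)
  let target := if qualifying ≠ [] then pvMaxInt? qualifying else pvMinInt? values
  match target with
  | some t =>
      match max_tokens_mapping.find? (fun p => p.2 == t) with
      | some p => p.1
      | none => ""   -- unreachable: target is a value of the mapping
  | none => ""       -- empty mapping: min([]) raises; excluded by Pre_

-- ===== PRECONDITION & SPEC =====
-- Pre_ excludes the empty mapping, on which A (and B) raise ValueError via min()/max(), and lists
-- with duplicate keys, which do not represent a Python dict (dict construction would collapse them).
def Pre_find_closest_max_tokens (suggested_max_tokens : Int) (max_tokens_mapping : List (String × Int)) : Prop :=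
  max_tokens_mapping ≠ [] ∧ (max_tokens_mapping.map Prod.fst).Nodup
instance (suggested_max_tokens : Int) (max_tokens_mapping : List (String × Int)) : Decidable (Pre_find_closest_max_tokens suggested_max_tokens max_tokens_mapping) := by unfold Pre_find_closest_max_tokens; infer_instance

def pvWitness_find_closest_max_tokens : Int × (List (String × Int)) := (1000, [("gpt", 2048), ("small", 512)])

def Spec_find_closest_max_tokens (suggested_max_tokens : Int) (max_tokens_mapping : List (String × Int)) (out : String) : Prop := out = find_closest_max_tokens_alt suggested_max_tokens max_tokens_mapping
instance (suggested_max_tokens : Int) (max_tokens_mapping : List (String × Int)) (out : String) : Decidable (Spec_find_closest_max_tokens suggested_max_tokens max_tokens_mapping out) := by unfold Spec_find_closest_max_tokens; infer_instance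

-- ===== CLAIM (what is proved, stated in full; the proofs are below) =====
def Claim_equal_find_closest_max_tokens : Prop := ∀ (suggested_max_tokens : Int) (max_tokens_mapping : List (String × Int)), Dom_find_closest_max_tokens suggested_max_tokens max_tokens_mapping → Pre_find_closest_max_tokens suggested_max_tokens max_tokens_mapping → Spec_find_closest_max_tokens suggested_max_tokens max_tokens_mapping (find_closest_max_tokens suggested_max_tokens max_tokens_mapping)

-- ===== LEMMAS AND PROOFS =====

-- proof-side helper: first-argmax-by-value fold (used to characterise both programs)
def pvArgMaxStep (acc : Option (String × Int)) (p : String × Int) : Option (String × Int) :=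
  match acc with
  | none => some p
  | some q => if q.2 < p.2 then some p else acc

def pvArgMax (l : List (String × Int)) : Option (String × Int) :=
  l.foldl pvArgMaxStep none

theorem pvArgMax_append (l : List (String × Int)) (p : String × Int) :
    pvArgMax (l ++ [p]) = pvArgMaxStep (pvArgMax l) p := by
  simp [pvArgMax, List.foldl_append]

-- A's running state after the whole loop is determined by the first max-by-value qualifying pair.
theorem pvA_fold_char (s : Int) (l : List (String × Int)) :
    l.foldl (pvAStep s) ((none : Option String), (none : Option Int)) =
      (match pvArgMax (l.filter (fun p => p.2 ≤ s)) with
       | none => ((none : Option String), (none : Option Int))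
       | some q => (some q.1, some (s - q.2))) := by
  induction l using List.reverseRecOn with
  | nil => rfl
  | append_singleton xs p ih =>
    rw [List.foldl_append, ih, List.filter_append]
    by_cases hp : p.2 ≤ s
    · have hf : List.filter (fun p => decide (p.2 ≤ s)) [p] = [p] := by simp [hp]
      rw [hf, pvArgMax_append]
      cases pvArgMax (xs.filter (fun p => p.2 ≤ s)) with
      | none =>
        simp [pvAStep, pvArgMaxStep, List.foldl_cons]
        omega
      | some q =>
        by_cases hq : q.2 < p.2
        · simp [pvAStep, pvArgMaxStep, List.foldl_cons, hq,
            show 0 ≤ s - p.2 ∧ s - p.2 < s - q.2 by omega]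
          exact fun h => absurd h (by omega)
        · simp [pvAStep, pvArgMaxStep, List.foldl_cons, hq]
    · have hf : List.filter (fun p => decide (p.2 ≤ s)) [p] = [] := by simp [hp]
      rw [hf, List.append_nil]
      cases pvArgMax (xs.filter (fun p => p.2 ≤ s)) with
      | none =>
        simp [pvAStep, List.foldl_cons]
        omega
      | some q =>
        simp [pvAStep, List.foldl_cons]
        exact fun h => absurd h hp

-- pvArgMax is none exactly on the empty list
theorem pvArgMax_foldl_some (l : List (String × Int)) (q : String × Int) :
    ∃ r, l.foldl pvArgMaxStep (some q) = some r := by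
  induction l generalizing q with
  | nil => exact ⟨q, rfl⟩
  | cons x xs ih =>
    simp only [List.foldl_cons, pvArgMaxStep]
    split <;> apply ih

theorem pvArgMax_none (l : List (String × Int)) : pvArgMax l = none ↔ l = [] := by
  cases l with
  | nil => simp [pvArgMax]
  | cons x xs =>
    simp only [pvArgMax, List.foldl_cons, pvArgMaxStep]
    obtain ⟨r, hr⟩ := pvArgMax_foldl_some xs x
    simp [hr]

theorem pvAMin_foldl_some (l : List (String × Int)) (q : String × Int) :
    ∃ r, l.foldl pvAMinStep (some q) = some r := by
  induction l generalizing q with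
  | nil => exact ⟨q, rfl⟩
  | cons x xs ih =>
    simp only [List.foldl_cons, pvAMinStep]
    split <;> apply ih

theorem pvAMin_none (l : List (String × Int)) : pvAMinBySnd l = none ↔ l = [] := by
  cases l with
  | nil => simp [pvAMinBySnd]
  | cons x xs =>
    simp only [pvAMinBySnd, List.foldl_cons, pvAMinStep]
    obtain ⟨r, hr⟩ := pvAMin_foldl_some xs x
    simp [hr]

-- pvMaxInt? on the values is the value of pvArgMax
theorem pvMaxInt_foldl (l : List (String × Int)) (acc : Option (String × Int)) :
    (l.map Prod.snd).foldl (fun acc v => match acc with | none => some v | some w => if w < v then some v else acc) (acc.map Prod.snd) =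
      (l.foldl pvArgMaxStep acc).map Prod.snd := by
  induction l generalizing acc with
  | nil => rfl
  | cons x xs ih =>
    cases acc with
    | none => simpa using ih (some x)
    | some q =>
      simp only [List.map_cons, List.foldl_cons, Option.map_some, pvArgMaxStep]
      split
      · simpa using ih (some x)
      · simpa using ih (some q)

theorem pvMaxInt_argmax (l : List (String × Int)) :
    pvMaxInt? (l.map Prod.snd) = (pvArgMax l).map Prod.snd := by
  simpa using pvMaxInt_foldl l none

theorem pvMinInt_foldl (l : List (String × Int)) (acc : Option (String × Int)) :
    (l.map Prod.snd).foldl (fun acc v => match acc with | none => some v | some w => if v < w then some v else acc) (acc.map Prod.snd) =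
      (l.foldl pvAMinStep acc).map Prod.snd := by
  induction l generalizing acc with
  | nil => rfl
  | cons x xs ih =>
    cases acc with
    | none => simpa using ih (some x)
    | some q =>
      simp only [List.map_cons, List.foldl_cons, Option.map_some, pvAMinStep]
      split
      · simpa using ih (some x)
      · simpa using ih (some q)

theorem pvMinInt_argmin (l : List (String × Int)) :
    pvMinInt? (l.map Prod.snd) = (pvAMinBySnd l).map Prod.snd := by
  simpa [pvAMinBySnd] using pvMinInt_foldl l none

-- the argmax result bounds every element
theorem pvArgMax_le_aux (l : List (String × Int)) (acc q : Option (String × Int))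
    (h : l.foldl pvArgMaxStep acc = q) :
    (∀ x ∈ l, ∀ r, q = some r → x.2 ≤ r.2) ∧ (∀ a r, acc = some a → q = some r → a.2 ≤ r.2) := by
  induction l generalizing acc with
  | nil =>
    subst h
    exact ⟨by simp, fun a r ha hr => by rw [ha] at hr; cases hr; exact le_refl _⟩
  | cons x xs ih =>
    rw [List.foldl_cons] at h
    obtain ⟨h1, h2⟩ := ih (pvArgMaxStep acc x) h
    refine ⟨?_, ?_⟩
    · intro y hy r hr
      rcases List.mem_cons.mp hy with rfl | hy
      · cases hacc : acc with
        | none => exact h2 y r (by rw [hacc]; rfl) hr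
        | some a =>
          by_cases hc : a.2 < y.2
          · exact h2 y r (by rw [hacc]; simp [pvArgMaxStep, hc]) hr
          · exact le_trans (by omega) (h2 a r (by rw [hacc]; simp [pvArgMaxStep, hc]) hr)
      · exact h1 y hy r hr
    · intro a r ha hr
      subst ha
      by_cases hc : a.2 < x.2
      · exact le_trans (by omega) (h2 x r (by simp [pvArgMaxStep, hc]) hr)
      · exact h2 a r (by simp [pvArgMaxStep, hc]) hr

theorem pvArgMax_le (l : List (String × Int)) (q : String × Int) (h : pvArgMax l = some q) :
    ∀ x ∈ l, x.2 ≤ q.2 :=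
  fun x hx => (pvArgMax_le_aux l none _ h).1 x hx q rfl

theorem pvAMin_le_aux (l : List (String × Int)) (acc q : Option (String × Int))
    (h : l.foldl pvAMinStep acc = q) :
    (∀ x ∈ l, ∀ r, q = some r → r.2 ≤ x.2) ∧ (∀ a r, acc = some a → q = some r → r.2 ≤ a.2) := by
  induction l generalizing acc with
  | nil =>
    subst h
    exact ⟨by simp, fun a r ha hr => by rw [ha] at hr; cases hr; exact le_refl _⟩
  | cons x xs ih =>
    rw [List.foldl_cons] at h
    obtain ⟨h1, h2⟩ := ih (pvAMinStep acc x) h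
    refine ⟨?_, ?_⟩
    · intro y hy r hr
      rcases List.mem_cons.mp hy with rfl | hy
      · cases hacc : acc with
        | none => exact h2 y r (by rw [hacc]; rfl) hr
        | some a =>
          by_cases hc : y.2 < a.2
          · exact h2 y r (by rw [hacc]; simp [pvAMinStep, hc]) hr
          · exact le_trans (h2 a r (by rw [hacc]; simp [pvAMinStep, hc]) hr) (by omega)
      · exact h1 y hy r hr
    · intro a r ha hr
      subst ha
      by_cases hc : x.2 < a.2
      · exact le_trans (h2 x r (by simp [pvAMinStep, hc]) hr) (by omega)
      · exact h2 a r (by simp [pvAMinStep, hc]) hr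

theorem pvAMin_le (l : List (String × Int)) (q : String × Int) (h : pvAMinBySnd l = some q) :
    ∀ x ∈ l, q.2 ≤ x.2 :=
  fun x hx => (pvAMin_le_aux l none _ h).1 x hx q rfl

-- the argmax result is the FIRST pair carrying its value
theorem pvArgMax_find (l : List (String × Int)) (q : String × Int) (h : pvArgMax l = some q) :
    l.find? (fun p => p.2 == q.2) = some q := by
  induction l using List.reverseRecOn with
  | nil => simp [pvArgMax] at h
  | append_singleton xs p ih =>
    rw [pvArgMax_append] at h
    cases hx : pvArgMax xs with
    | none =>
      rw [hx] at h
      simp only [pvArgMaxStep] at h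
      injection h with h
      subst h
      have hxs : xs = [] := (pvArgMax_none xs).mp hx
      subst hxs
      simp
    | some r =>
      rw [hx] at h
      simp only [pvArgMaxStep] at h
      by_cases hc : r.2 < p.2
      · rw [if_pos hc] at h
        injection h with h
        subst h
        have hnone : xs.find? (fun x => x.2 == p.2) = none := by
          rw [List.find?_eq_none]
          intro x hxm
          have := pvArgMax_le xs r hx x hxm
          simp only [beq_iff_eq]
          omega
        rw [List.find?_append, hnone]
        simp
      · rw [if_neg hc] at h
        injection h with h
        subst h
        rw [List.find?_append, ih hx]
        rfl

theorem pvAMin_find (l : List (String × Int)) (q : String × Int) (h : pvAMinBySnd l = some q) :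
    l.find? (fun p => p.2 == q.2) = some q := by
  induction l using List.reverseRecOn with
  | nil => simp [pvAMinBySnd] at h
  | append_singleton xs p ih =>
    have hApp : pvAMinBySnd (xs ++ [p]) = pvAMinStep (pvAMinBySnd xs) p := by
      simp [pvAMinBySnd, List.foldl_append]
    rw [hApp] at h
    cases hx : pvAMinBySnd xs with
    | none =>
      rw [hx] at h
      simp only [pvAMinStep] at h
      injection h with h
      subst h
      have hxs : xs = [] := (pvAMin_none xs).mp hx
      subst hxs
      simp
    | some r =>
      rw [hx] at h
      simp only [pvAMinStep] at h
      by_cases hc : p.2 < r.2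
      · rw [if_pos hc] at h
        injection h with h
        subst h
        have hnone : xs.find? (fun x => x.2 == p.2) = none := by
          rw [List.find?_eq_none]
          intro x hxm
          have := pvAMin_le xs r hx x hxm
          simp only [beq_iff_eq]
          omega
        rw [List.find?_append, hnone]
        simp
      · rw [if_neg hc] at h
        injection h with h
        subst h
        rw [List.find?_append, ih hx]
        rfl

-- find? passes through a filter whose condition is implied by the predicate
theorem pvFind_filter {α : Type} (pred cond : α → Bool) (l : List α)
    (himp : ∀ x, pred x = true → cond x = true) :
    (l.filter cond).find? pred = l.find? pred := by
  induction l with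
  | nil => rfl
  | cons x xs ih =>
    cases hpx : pred x with
    | true =>
      have hcx : cond x = true := himp x hpx
      simp [hcx, hpx]
    | false =>
      by_cases hcx : cond x = true
      · simp [hcx, hpx, ih]
      · simp [hcx, hpx, ih]

-- the values of the filtered mapping are the filtered values
theorem pvFilter_map_snd (s : Int) (m : List (String × Int)) :
    (m.map Prod.snd).filter (fun v => v ≤ s) = (m.filter (fun p => p.2 ≤ s)).map Prod.snd := by
  induction m with
  | nil => rfl
  | cons x xs ih =>
    by_cases hx : x.2 ≤ s
    · simp [hx, ih]
    · simp [hx, ih]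

-- ===== VERDICT (by name: the statement is the Claim_ definition above) =====
theorem find_closest_max_tokens_spec : Claim_equal_find_closest_max_tokens := by
  intro s m _dom pre
  simp only [Spec_find_closest_max_tokens, find_closest_max_tokens, find_closest_max_tokens_alt]
  rw [pvA_fold_char, pvFilter_map_snd, pvMaxInt_argmax]
  cases hq : pvArgMax (m.filter (fun p => p.2 ≤ s)) with
  | none =>
    have hfe : m.filter (fun p => p.2 ≤ s) = [] := (pvArgMax_none _).mp hq
    rw [hfe]
    simp only [List.map_nil, ne_eq, not_true_eq_false, if_false, pvMinInt_argmin]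
    cases hmin : pvAMinBySnd m with
    | none => exact absurd ((pvAMin_none m).mp hmin) pre.1
    | some r =>
      simp only [Option.map_some]
      rw [pvAMin_find m r hmin]
  | some q =>
    have hmem : q ∈ m.filter (fun p => p.2 ≤ s) :=
      List.mem_of_find?_eq_some (pvArgMax_find _ q hq)
    have hne : (m.filter (fun p => p.2 ≤ s)).map Prod.snd ≠ [] := by
      simp only [ne_eq, List.map_eq_nil_iff]
      intro h; rw [h] at hmem; exact absurd hmem (List.not_mem_nil)
    rw [if_pos hne]
    simp only [Option.map_some]
    have hqs : q.2 ≤ s := by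
      have := List.of_mem_filter hmem
      simpa using this
    have : m.find? (fun p => p.2 == q.2) = some q := by
      rw [← pvFind_filter (fun p => p.2 == q.2) (fun p => decide (p.2 ≤ s)) m
        (by intro x hx; simp only [beq_iff_eq] at hx; simp [hx, hqs])]
      exact pvArgMax_find _ q hq
    rw [this]
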